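-- pv_equiv track=rewrite | github.com/hasunghwa/algorithm | Python/String/5555.py | search
-- ===== SOURCE A (Python) =====
-- def search(R, S):
--   F = R[0]
--   for i in range(len(S)):
--     if S[i] == F:
--       A = ''
--       B = ''
--       if len(R) + i > len(S):
--         A = S[i:]
--         B = S[:len(R)-len(A)]
--       else:
--         A = S[i:i+len(R)]
--
--       if A + B == R:
--         return True
--   return False
-- ===== SOURCE B (Python) =====
-- def search(R, S):
--     return R in S + S[:len(R) - 1]
-- ===== Notes on version B (the rewrite author's own statement) =====
-- stated objective: faster
-- what changed: Replaces the explicit index loop with per-index slicing and concatenation by a single substring test 'R in S + S[:len(R)-1]', which preserves the wraparound semantics and delegates the scan to the C-level str.__contains__ (two-way/Crochemore-Perrin) search.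
-- outside the precondition, e.g. on search('', 'abc'): A raises IndexError, B returns True
-- crash fix: On R = '' A raises IndexError (R[0]); B returns True (the empty pattern matches everywhere). — e.g. on search("", "a"): A raises IndexError, B returns true
import Mathlib
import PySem

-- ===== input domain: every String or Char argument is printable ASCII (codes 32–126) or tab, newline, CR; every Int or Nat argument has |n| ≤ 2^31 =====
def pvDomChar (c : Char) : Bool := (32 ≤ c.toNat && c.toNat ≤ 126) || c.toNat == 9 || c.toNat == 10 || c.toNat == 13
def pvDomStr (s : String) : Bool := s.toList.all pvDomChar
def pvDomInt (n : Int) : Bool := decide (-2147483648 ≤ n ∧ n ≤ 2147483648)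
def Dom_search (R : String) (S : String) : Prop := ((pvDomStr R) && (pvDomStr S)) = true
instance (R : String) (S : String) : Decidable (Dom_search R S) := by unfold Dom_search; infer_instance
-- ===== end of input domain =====

-- B replaces A's per-index slice-and-concatenate loop by a single substring test on S ++ S[:len(R)-1] (a faster search; same wraparound semantics).


-- ===== PORT A =====
-- Python A: for each i with S[i] == R[0], build A (and wraparound B) by slicing and compare A + B with R.
def search (R : String) (S : String) : Bool :=
  let Rl := R.toList
  let Sl := S.toList
  let F := PySem.List.pyGetD Rl 0 ' '   -- R[0]; Pre_search excludes R = "" where Python raises IndexError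
  (PySem.List.pyRange 0 (Sl.length : Int) 1).any (fun i =>
    if PySem.List.pyGetD Sl i ' ' == F then
      -- A = '' ; B = '' ; then one of the two branches assigns them; finally A + B == R
      (if (Rl.length : Int) + i > (Sl.length : Int) then
          let A := PySem.List.slice Sl (some i) none
          A ++ PySem.List.slice Sl none (some ((Rl.length : Int) - (A.length : Int)))
        else
          PySem.List.slice Sl (some i) (some (i + (Rl.length : Int))) ++ ([] : List Char)) == Rl
    else false)

-- ===== PORT B =====
-- Python B: return R in S + S[:len(R) - 1]
def search_alt (R : String) (S : String) : Bool :=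
  PySem.Chars.isIn R.toList
    (S.toList ++ PySem.List.slice S.toList none (some ((R.toList.length : Int) - 1)))

-- ===== PRECONDITION & SPEC =====
-- Pre_search excludes exactly R = "", on which Python A raises IndexError at R[0].
def Pre_search (R : String) (S : String) : Prop := R ≠ ""
instance (R : String) (S : String) : Decidable (Pre_search R S) := by unfold Pre_search; infer_instance
def pvWitness_search : String × String := ("ba", "ab")

-- On R = "" A raises IndexError (R[0]); B returns True (the empty pattern matches everywhere).
def Raises_search (R : String) (S : String) : Prop := R = ""
instance (R : String) (S : String) : Decidable (Raises_search R S) := by unfold Raises_search; infer_instance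
def pvRaiseWitness_search : String × String := ("", "a")
def pvRaiseWitnessOut_search : Bool := true

def Spec_search (R : String) (S : String) (out : Bool) : Prop := out = search_alt R S
instance (R : String) (S : String) (out : Bool) : Decidable (Spec_search R S out) := by unfold Spec_search; infer_instance

-- ===== CLAIM (what is proved, stated in full; the proofs are below) =====
def Claim_equal_search : Prop := ∀ (R : String) (S : String), Dom_search R S → Pre_search R S → Spec_search R S (search R S)
def Claim_raises_search : Prop := (∀ (R : String) (S : String), Dom_search R S → Raises_search R S → ¬ Pre_search R S) ∧ (Dom_search (pvRaiseWitness_search.1) (pvRaiseWitness_search.2) ∧ Raises_search (pvRaiseWitness_search.1) (pvRaiseWitness_search.2) ∧ search_alt (pvRaiseWitness_search.1) (pvRaiseWitness_search.2) = pvRaiseWitnessOut_search)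

-- ===== LEMMAS AND PROOFS =====

-- A's concatenation A ++ B at index i is exactly the length-|R| window of S ++ S[:|R|-1] at i.
theorem pvAB (Rl Sl : List Char) (i : Nat) (hi : i < Sl.length) (hR : Rl ≠ []) :
    (if (Rl.length : Int) + (i:Int) > (Sl.length : Int) then
        PySem.List.slice Sl (some (i:Int)) none ++
          PySem.List.slice Sl none (some ((Rl.length : Int) - (((PySem.List.slice Sl (some (i:Int)) none).length : Int))))
      else
        PySem.List.slice Sl (some (i:Int)) (some ((i:Int) + (Rl.length : Int))) ++ [])
    = ((Sl ++ Sl.take (Rl.length - 1)).drop i).take Rl.length := by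
  have hR1 : 1 ≤ Rl.length := List.length_pos_of_ne_nil hR
  rw [List.drop_append_of_le_length (le_of_lt hi), List.take_append, List.take_take]
  rw [PySem.List.slice_from_natCast, PySem.List.slice_natCast_add]
  simp only [List.length_drop]
  split_ifs with h
  · have hw : Sl.length < Rl.length + i := by exact_mod_cast h
    have hb : (Rl.length : Int) - ((Sl.length - i : Nat) : Int)
        = (((Rl.length - (Sl.length - i)) : Nat) : Int) := by omega
    rw [hb, PySem.List.slice_to_natCast]
    have h1 : (Sl.drop i).take Rl.length = Sl.drop i := by
      apply List.take_of_length_le; simp; omega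
    have h2 : min (Rl.length - (Sl.length - i)) (Rl.length - 1) = Rl.length - (Sl.length - i) := by
      omega
    rw [h1, h2]
  · have hw : Rl.length + i ≤ Sl.length := by
      have := not_lt.mp (fun hc => h (by exact_mod_cast hc : ((Sl.length:Int) < Rl.length + i)))
      exact_mod_cast this
    have h2 : min (Rl.length - (Sl.length - i)) (Rl.length - 1) = 0 := by omega
    rw [h2]; simp

-- a match at i forces A's first-character guard S[i] == R[0]
theorem pvHead (Rl Sl : List Char) (i : Nat) (hi : i < Sl.length) (hR : Rl ≠ [])
    (hpre : Rl <+: (Sl ++ Sl.take (Rl.length - 1)).drop i) :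
    Sl.getD i ' ' = Rl.getD 0 ' ' := by
  obtain ⟨t, ht⟩ := hpre
  have h1 : ((Sl ++ Sl.take (Rl.length - 1)).drop i).head? = Sl[i]? := by
    rw [List.drop_append_of_le_length (le_of_lt hi)]
    rw [List.head?_append_of_ne_nil]
    · exact List.head?_drop
    · simp [List.drop_eq_nil_iff]; omega
  have h2 : ((Sl ++ Sl.take (Rl.length - 1)).drop i).head? = Rl.head? := by
    rw [← ht, List.head?_append_of_ne_nil _ hR]
  have h3 : Sl[i]? = Rl.head? := by rw [← h1, h2]
  rw [List.getD_eq_getElem?_getD, List.getD_eq_getElem?_getD, h3]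
  cases Rl with
  | nil => simp at hR
  | cons a l => simp

theorem search_spec : Claim_equal_search := by
  intro R S _ hpre
  unfold Spec_search
  have hR : R.toList ≠ [] := by simp [String.toList_eq_nil_iff]; exact hpre
  have hR1 : 1 ≤ R.toList.length := List.length_pos_of_ne_nil hR
  simp only [search, search_alt]
  have hslice : PySem.List.slice S.toList none (some ((R.toList.length : Int) - 1))
      = S.toList.take (R.toList.length - 1) := by
    have hb : (R.toList.length : Int) - 1 = ((R.toList.length - 1 : Nat) : Int) := by omega
    rw [hb, PySem.List.slice_to_natCast]
  rw [hslice, Bool.eq_iff_iff, List.any_eq_true, ← PySem.Chars.exists_prefix_drop_iff_isIn]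
  constructor
  · rintro ⟨x, hx, hbody⟩
    rw [PySem.List.mem_pyRange_one] at hx
    have hxi : x = ((x.toNat : Nat) : Int) := (Int.toNat_of_nonneg hx.1).symm
    have hi : x.toNat < S.toList.length := by omega
    refine ⟨x.toNat, ?_⟩
    rw [hxi] at hbody
    by_cases hg : (PySem.List.pyGetD S.toList ((x.toNat : Nat) : Int) ' '
        == PySem.List.pyGetD R.toList 0 ' ') = true
    · rw [if_pos hg, pvAB R.toList S.toList x.toNat hi hR, beq_iff_eq] at hbody
      exact List.prefix_iff_eq_take.mpr hbody.symm
    · rw [if_neg hg] at hbody; exact absurd hbody (by simp)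
  · rintro ⟨j, hj⟩
    have hjlt : j < S.toList.length := by
      by_contra hge
      have hlen := hj.length_le
      simp only [List.length_drop, List.length_append, List.length_take] at hlen
      omega
    refine ⟨(j : Int), ?_, ?_⟩
    · rw [PySem.List.mem_pyRange_one]
      constructor
      · positivity
      · exact_mod_cast hjlt
    · have hg : S.toList.getD j ' ' = R.toList.getD 0 ' ' := pvHead R.toList S.toList j hjlt hR hj
      rw [if_pos, pvAB R.toList S.toList j hjlt hR, beq_iff_eq]
      · exact (List.prefix_iff_eq_take.mp hj).symm
      · rw [beq_iff_eq, PySem.List.pyGetD_natCast, PySem.List.pyGetD_zero]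
        exact hg

@[simp] theorem search_raises : Claim_raises_search := by
  unfold Claim_raises_search
  refine ⟨fun R S _ h hp => hp h, by decide⟩
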